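-- pv_equiv track=rewrite | github.com/FedericoSantona/LayoutAware-SurfaceCode | src/surface_code/reporting.py | _conjugate_axis_and_phase
-- ===== SOURCE A (Python) =====
-- from typing import Any, Dict, List, Optional, Tuple, Union
--
-- def _conjugate_axis_and_phase(axis: str, virtual_gates: List[str]) -> tuple[str, int]:
--     """Heisenberg-conjugate a single-qubit Pauli axis ('Z' or 'X') by a list of virtual gates.
--     Walk gates in reverse order (right-to-left): returns (final_axis, phase) with phase in {+1,-1}.
--     Rules used:
--       H: swaps X<->Z (no sign)
--       X: XZX = -Z,  XXX = +X
--       Z: ZXZ = -X,  ZZZ = +Z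
--     """
--     axis = axis.upper()
--     if axis not in ("Z", "X"):
--         raise ValueError(f"axis must be 'Z' or 'X', got {axis}")
--     x = (axis == "X")
--     z = (axis == "Z")
--     phase = +1
--     for g in reversed(virtual_gates or []):
--         g = str(g).upper()
--         if g == "H":
--             x, z = z, x  # swap, no sign
--         elif g == "X":
--             if z:
--                 phase *= -1  # XZX = -Z
--             # XXX = +X (no sign)
--         elif g == "Z":
--             if x:
--                 phase *= -1  # ZXZ = -X
--             # ZZZ = +Z (no sign)
--         else:
--             # ignore gates we don't model; extend here if needed
--             continue
--     return ("X" if x else "Z"), phase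
-- ===== SOURCE B (Python) =====
-- def _conjugate_axis_and_phase(axis, virtual_gates):
--     a = str(axis).upper()
--     if a not in ("Z", "X"):
--         raise ValueError(f"axis must be 'Z' or 'X', got {a}")
--     # Staged counting instead of a state machine: normalize once, count H gates,
--     # then a forward scan counts sign flips using the parity of H gates still ahead.
--     gs = [str(g).upper() for g in (virtual_gates or [])]
--     h_total = gs.count("H")
--     flips = 0
--     h_seen = 0
--     for g in gs:
--         if g == "H":
--             h_seen += 1
--         elif g == "X" or g == "Z":
--             cur_x = ((1 if a == "X" else 0) + h_total - h_seen) % 2 == 1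
--             if (g == "X") != cur_x:
--                 flips += 1
--     final_x = ((1 if a == "X" else 0) + h_total) % 2 == 1
--     return ("X" if final_x else "Z"), (1 if flips % 2 == 0 else -1)
-- ===== Notes on version B (the rewrite author's own statement) =====
-- stated objective: alternative
-- what changed: Replaces A's reverse-order walk of a mutable (x, z, phase) state machine with staged counting: normalize the gate list once, count the H gates, then a single forward scan counts phase flips using the parity of H gates still ahead of each X/Z gate; the final axis is decoded from the H-count parity and the phase from the flip-count parity. Pre_ excludes inputs where axis.upper() is neither 'X' nor 'Z', on which both A and B raise ValueError.
import Mathlib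
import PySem

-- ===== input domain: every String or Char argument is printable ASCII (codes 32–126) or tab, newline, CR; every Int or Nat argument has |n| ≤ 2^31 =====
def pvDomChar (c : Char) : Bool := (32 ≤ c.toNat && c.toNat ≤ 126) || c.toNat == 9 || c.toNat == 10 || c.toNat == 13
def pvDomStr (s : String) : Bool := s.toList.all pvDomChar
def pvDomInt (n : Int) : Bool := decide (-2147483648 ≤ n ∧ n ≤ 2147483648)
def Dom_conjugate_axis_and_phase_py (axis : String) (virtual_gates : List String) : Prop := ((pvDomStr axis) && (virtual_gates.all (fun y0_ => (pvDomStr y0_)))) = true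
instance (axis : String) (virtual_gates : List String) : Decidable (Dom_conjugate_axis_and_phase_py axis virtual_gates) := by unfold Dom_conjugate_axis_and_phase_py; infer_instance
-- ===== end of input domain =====

-- B replaces A's reverse-order state-machine walk by staged counting: normalize once,
-- count H gates, then one forward scan counts sign flips from the parity of H gates
-- still ahead; axis and phase are decoded from the two counts (alternative decomposition).


-- ===== PORT A =====
-- one loop iteration of A: state (x, z, phase)
def pvStepA (st : Bool × Bool × Int) (g : String) : Bool × Bool × Int :=
  let gu := PySem.Str.upper g
  if gu == "H" then (st.2.1, st.1, st.2.2)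
  else if gu == "X" then (st.1, st.2.1, if st.2.1 then st.2.2 * (-1) else st.2.2)
  else if gu == "Z" then (st.1, st.2.1, if st.1 then st.2.2 * (-1) else st.2.2)
  else st

def conjugate_axis_and_phase_py (axis : String) (virtual_gates : List String) : String × Int :=
  let a := PySem.Str.upper axis
  -- the 'raise ValueError' branch (a ∉ {"Z","X"}) is excluded by Pre_
  let st := virtual_gates.reverse.foldl pvStepA (a == "X", a == "Z", 1)
  ((if st.1 then "X" else "Z"), st.2.2)

-- ===== PORT B =====
-- one iteration of B's forward scan: state (h_seen, flips)
def pvStepB (ai : Int) (hTot : Int) (st : Int × Int) (g : String) : Int × Int :=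
  if g == "H" then (st.1 + 1, st.2)
  else if g == "X" || g == "Z" then
    if (g == "X") != (PySem.Int.mod (ai + hTot - st.1) 2 == 1) then (st.1, st.2 + 1) else st
  else st

def conjugate_axis_and_phase_py_alt (axis : String) (virtual_gates : List String) : String × Int :=
  let a := PySem.Str.upper axis
  let ai : Int := if a == "X" then 1 else 0
  let gs := virtual_gates.map PySem.Str.upper
  let hTot : Int := (PySem.List.count gs "H" : Int)
  let st := gs.foldl (pvStepB ai hTot) (0, 0)
  ((if PySem.Int.mod (ai + hTot) 2 == 1 then "X" else "Z"),
   if PySem.Int.mod st.2 2 == 0 then (1 : Int) else -1)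

-- ===== PRECONDITION & SPEC =====
-- Pre_ excludes exactly the inputs where A raises ValueError (axis.upper() not 'X'/'Z').
def Pre_conjugate_axis_and_phase_py (axis : String) (virtual_gates : List String) : Prop :=
  PySem.Str.upper axis = "X" ∨ PySem.Str.upper axis = "Z"
instance (axis : String) (virtual_gates : List String) : Decidable (Pre_conjugate_axis_and_phase_py axis virtual_gates) := by unfold Pre_conjugate_axis_and_phase_py; infer_instance

def pvWitness_conjugate_axis_and_phase_py : String × List String := ("x", ["h", "X", "CNOT", "z"])

def Spec_conjugate_axis_and_phase_py (axis : String) (virtual_gates : List String) (out : String × Int) : Prop := out = conjugate_axis_and_phase_py_alt axis virtual_gates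
instance (axis : String) (virtual_gates : List String) (out : String × Int) : Decidable (Spec_conjugate_axis_and_phase_py axis virtual_gates out) := by unfold Spec_conjugate_axis_and_phase_py; infer_instance

-- ===== CLAIM =====
def Claim_equal_conjugate_axis_and_phase_py : Prop := ∀ (axis : String) (virtual_gates : List String), Dom_conjugate_axis_and_phase_py axis virtual_gates → Pre_conjugate_axis_and_phase_py axis virtual_gates → Spec_conjugate_axis_and_phase_py axis virtual_gates (conjugate_axis_and_phase_py axis virtual_gates)

-- ===== LEMMAS AND PROOFS =====
-- H-count of a (normalized) gate list, as an Int
def pvCnt (m : List String) : Int := (m.count "H" : Int)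

-- flip count of B's scan over the suffix m when hTot - h_seen = M on entry
def pvFl (ai M : Int) : List String → Int
  | [] => 0
  | g :: t =>
      if g == "H" then pvFl ai (M - 1) t
      else (if (g == "X" || g == "Z") && ((g == "X") != (PySem.Int.mod (ai + M) 2 == 1))
            then 1 else 0) + pvFl ai M t

-- axis A holds just before applying the head gate, given the (normalized) suffix after it
def pvAxis (x0 : Bool) (m : List String) : Bool := x0 != decide (m.count "H" % 2 = 1)

-- number of phase flips A performs over a (normalized) list, forward recursion
def pvFlips (x0 : Bool) : List String → Nat
  | [] => 0
  | g :: t =>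
      (if g ≠ "H" ∧ (g = "X" ∨ g = "Z") ∧ ((g = "X") ≠ pvAxis x0 t) then 1 else 0) + pvFlips x0 t

def pvSgn (n : Nat) : Int := if n % 2 = 0 then 1 else -1

theorem pv_parity_bridge (b : Bool) (n : Nat) :
    (b != decide (n % 2 = 1)) = (PySem.Int.mod ((if b then 1 else 0) + (n : Int)) 2 == 1) := by
  rw [PySem.Int.mod_eq_emod_of_pos (by omega)]
  rcases b with _ | _ <;> simp <;>
    rcases Nat.even_or_odd n with he | ho
  · have h := Nat.even_iff.mp he
    have h2 : ((n:Int)) % 2 = 0 := by omega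
    simp [h, h2]
  · have h := Nat.odd_iff.mp ho
    have h2 : ((n:Int)) % 2 = 1 := by omega
    simp [h, h2]
  · have h := Nat.even_iff.mp he
    have h2 : (1 + (n:Int)) % 2 = 1 := by omega
    simp [h, h2]
  · have h := Nat.odd_iff.mp ho
    have h2 : (1 + (n:Int)) % 2 = 0 := by omega
    simp [h, h2]

theorem pvFl_eq (x0 : Bool) (m : List String) :
    pvFl (if x0 then 1 else 0) (pvCnt m) m = (pvFlips x0 m : Int) := by
  induction m with
  | nil => simp [pvFl, pvFlips]
  | cons g t ih =>
      by_cases hH : g = "H"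
      · subst hH
        have h1 : pvCnt ("H" :: t) - 1 = pvCnt t := by
          simp [pvCnt, List.count_cons]
        simp only [pvFl, pvFlips, BEq.rfl, if_true, h1, ih]
        simp
      · have hgH : (g == "H") = false := by simp [hH]
        have hc : pvCnt (g :: t) = pvCnt t := by simp [pvCnt, hH]
        have hb : (PySem.Int.mod ((if x0 then 1 else 0) + pvCnt t) 2 == 1) = pvAxis x0 t := by
          have := pv_parity_bridge x0 (t.count "H")
          simp only [pvAxis, pvCnt] at *
          rw [this]
        simp only [pvFl, pvFlips, hgH, Bool.false_eq_true, if_false, hc, ih, hb]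
        by_cases hx : g = "X" <;> by_cases hz : g = "Z" <;>
          rcases ha : pvAxis x0 t with _|_ <;>
          simp [hx, hz, ha, hH]

theorem pv_foldB (ai hTot : Int) (l : List String) (h0 f0 : Int) :
    l.foldl (pvStepB ai hTot) (h0, f0) = (h0 + pvCnt l, f0 + pvFl ai (hTot - h0) l) := by
  induction l generalizing h0 f0 with
  | nil => simp [pvCnt, pvFl]
  | cons g t ih =>
      by_cases hH : g = "H"
      · subst hH
        have hstep : pvStepB ai hTot (h0, f0) "H" = (h0 + 1, f0) := by simp [pvStepB]
        rw [List.foldl_cons, hstep, ih]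
        have h1 : pvCnt ("H" :: t) = pvCnt t + 1 := by simp [pvCnt, List.count_cons]
        have h2 : pvFl ai (hTot - h0) ("H" :: t) = pvFl ai (hTot - h0 - 1) t := by
          simp [pvFl]
        have h3 : hTot - (h0 + 1) = hTot - h0 - 1 := by ring
        rw [h1, h2, h3]
        refine Prod.ext ?_ rfl
        simp; ring
      · have hgH : (g == "H") = false := by simp [hH]
        have harg : ai + (hTot - h0) = ai + hTot - h0 := by ring
        have hstep : pvStepB ai hTot (h0, f0) g
            = (h0, f0 + (if (g == "X" || g == "Z") && ((g == "X") != (PySem.Int.mod (ai + hTot - h0) 2 == 1)) then 1 else 0)) := by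
          simp only [pvStepB, hgH, Bool.false_eq_true, if_false]
          rcases hxz : (g == "X" || g == "Z") with _|_ <;>
            rcases hC : ((g == "X") != (PySem.Int.mod (ai + hTot - h0) 2 == 1)) with _|_ <;>
            simp [hxz, hC]
        have hc : pvCnt (g :: t) = pvCnt t := by simp [pvCnt, hH]
        have hFl : pvFl ai (hTot - h0) (g :: t)
            = (if (g == "X" || g == "Z") && ((g == "X") != (PySem.Int.mod (ai + hTot - h0) 2 == 1)) then 1 else 0) + pvFl ai (hTot - h0) t := by
          simp only [pvFl, hgH, Bool.false_eq_true, if_false, harg]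
        rw [List.foldl_cons, hstep, ih, hc, hFl]
        refine Prod.ext rfl ?_
        simp; ring

theorem pvSgn_flip (n : Nat) : pvSgn (1 + n) = -pvSgn n := by
  rcases Nat.even_or_odd n with he | ho
  · have h := Nat.even_iff.mp he
    simp [pvSgn, Nat.add_mod, h]
  · have h := Nat.odd_iff.mp ho
    simp [pvSgn, Nat.add_mod, h]

theorem pv_foldA (l : List String) (x0 : Bool) (p0 : Int) :
    l.foldr (fun g s => pvStepA s g) (x0, !x0, p0) =
      (pvAxis x0 (l.map PySem.Str.upper), !(pvAxis x0 (l.map PySem.Str.upper)),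
       p0 * pvSgn (pvFlips x0 (l.map PySem.Str.upper))) := by
  induction l with
  | nil => simp [pvAxis, pvFlips, pvSgn]
  | cons g t ih =>
      rw [List.foldr_cons, ih, List.map_cons]
      simp only [pvStepA]
      obtain ⟨u, hu⟩ : ∃ u, PySem.Str.upper g = u := ⟨_, rfl⟩
      rw [hu]
      by_cases h1 : u = "H"
      · have hA : pvAxis x0 (u :: t.map PySem.Str.upper)
            = !(pvAxis x0 (t.map PySem.Str.upper)) := by
          simp only [pvAxis, List.count_cons, h1]
          rcases hh : decide ((t.map PySem.Str.upper).count "H" % 2 = 1) with _|_ <;>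
            rcases x0 with _|_ <;>
            simp_all [Nat.add_mod]
        have hFl : pvFlips x0 (u :: t.map PySem.Str.upper)
            = pvFlips x0 (t.map PySem.Str.upper) := by
          simp [pvFlips, h1]
        rw [hA, hFl]
        simp [h1]
      · have hcnt : pvAxis x0 (u :: t.map PySem.Str.upper)
            = pvAxis x0 (t.map PySem.Str.upper) := by
          simp [pvAxis, List.count_cons, h1]
        rw [hcnt]
        by_cases h2 : u = "X"
        · have hFl : pvFlips x0 (u :: t.map PySem.Str.upper)
              = (if pvAxis x0 (t.map PySem.Str.upper) = false then 1 else 0)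
                + pvFlips x0 (t.map PySem.Str.upper) := by
            simp only [pvFlips, h2]
            rcases pvAxis x0 (t.map PySem.Str.upper) with _|_ <;> simp [h1, h2]
          rw [hFl]
          rcases hx : pvAxis x0 (t.map PySem.Str.upper) with _|_
          · simp [h1, h2, hx, pvSgn_flip]
          · simp [h1, h2, hx]
        · by_cases h3 : u = "Z"
          · have hFl : pvFlips x0 (u :: t.map PySem.Str.upper)
                = (if pvAxis x0 (t.map PySem.Str.upper) = true then 1 else 0)
                  + pvFlips x0 (t.map PySem.Str.upper) := by
              simp only [pvFlips, h3]
              rcases pvAxis x0 (t.map PySem.Str.upper) with _|_ <;> simp [h1, h2, h3]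
            rw [hFl]
            rcases hx : pvAxis x0 (t.map PySem.Str.upper) with _|_
            · simp [h1, h2, h3, hx]
            · simp [h1, h2, h3, hx, pvSgn_flip]
          · have hFl : pvFlips x0 (u :: t.map PySem.Str.upper)
                = pvFlips x0 (t.map PySem.Str.upper) := by
              simp [pvFlips, h2, h3]
            rw [hFl]
            simp [h1, h2, h3]

theorem pv_sign_bridge (n : Nat) :
    pvSgn n = (if PySem.Int.mod ((n : Nat) : Int) 2 == 0 then (1 : Int) else -1) := by
  rw [PySem.Int.mod_eq_emod_of_pos (by omega)]
  rcases Nat.even_or_odd n with he | ho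
  · have h0 : n % 2 = 0 := Nat.even_iff.mp he
    have : ((n : Nat) : Int) % 2 = 0 := by omega
    simp [pvSgn, h0, this]
  · have h1 : n % 2 = 1 := Nat.odd_iff.mp ho
    have : ((n : Nat) : Int) % 2 = 1 := by omega
    simp [pvSgn, h1, this]

theorem pv_main (axis : String) (vg : List String)
    (hpre : PySem.Str.upper axis = "X" ∨ PySem.Str.upper axis = "Z") :
    conjugate_axis_and_phase_py axis vg = conjugate_axis_and_phase_py_alt axis vg := by
  unfold conjugate_axis_and_phase_py conjugate_axis_and_phase_py_alt
  simp only []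
  have hzx : (PySem.Str.upper axis == "Z") = !(PySem.Str.upper axis == "X") := by
    rcases hpre with h | h <;> simp [h]
  rw [hzx, List.foldl_reverse]
  have hcount : (PySem.List.count (vg.map PySem.Str.upper) "H" : Int)
      = pvCnt (vg.map PySem.Str.upper) := by
    simp [PySem.List.count, pvCnt]
  rw [hcount, pv_foldA vg (PySem.Str.upper axis == "X") 1, pv_foldB]
  have hax : pvAxis (PySem.Str.upper axis == "X") (vg.map PySem.Str.upper)
      = (PySem.Int.mod ((if (PySem.Str.upper axis == "X") then (1:Int) else 0) + pvCnt (vg.map PySem.Str.upper)) 2 == 1) := by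
    have := pv_parity_bridge (PySem.Str.upper axis == "X") ((vg.map PySem.Str.upper).count "H")
    simpa [pvAxis, pvCnt] using this
  have hfl : pvFl (if (PySem.Str.upper axis == "X") then (1:Int) else 0)
        (pvCnt (vg.map PySem.Str.upper) - 0) (vg.map PySem.Str.upper)
      = (pvFlips (PySem.Str.upper axis == "X") (vg.map PySem.Str.upper) : Int) := by
    rw [sub_zero]; exact pvFl_eq _ _
  rw [hax, hfl]
  refine Prod.ext rfl ?_
  simp only [zero_add, one_mul]
  exact pv_sign_bridge _

-- ===== VERDICT =====
theorem conjugate_axis_and_phase_py_spec : Claim_equal_conjugate_axis_and_phase_py := by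
  intro axis vg _ hpre
  exact pv_main axis vg hpre
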